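-- pv_equiv track=rewrite | github.com/alex-strangelove/xilinx_ise_vscode | configure.py | _remove_existing_ise_config
-- ===== SOURCE A (Python) =====
-- def _remove_existing_ise_config(lines):
--     """Remove existing ise-vm host block from SSH config lines."""
--     filtered_lines = []
--     in_ise_block = False
--
--     for line in lines:
--         if line.strip().startswith("Host ise-vm"):
--             in_ise_block = True
--             continue
--         elif line.strip().startswith("Host ") and in_ise_block:
--             in_ise_block = False
--             filtered_lines.append(line)
--         elif not in_ise_block:
--             filtered_lines.append(line)
--
--     return filtered_lines
-- ===== SOURCE B (Python) =====
-- def _remove_existing_ise_config(lines):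
--     """Remove existing ise-vm host block from SSH config lines."""
--     # Phase 1: group lines into segments; segments[0] is the preamble
--     # (lines before the first "Host " header), each later segment starts
--     # with a "Host " header line.
--     segments = []
--     current = []
--     for line in lines:
--         if line.strip().startswith("Host "):
--             segments.append(current)
--             current = [line]
--         else:
--             current.append(line)
--     segments.append(current)
--     # Phase 2: keep every segment that is not an ise-vm host block.
--     result = []
--     for seg in segments:
--         if not (seg and seg[0].strip().startswith("Host ise-vm")):
--             result.extend(seg)
--     return result
-- ===== Notes on version B (the rewrite author's own statement) =====
-- stated objective: alternative
-- what changed: Replaces the per-line in_ise_block boolean state machine with a two-phase decomposition: first group the lines into a preamble plus Host-header segments, then concatenate the segments whose header is not an ise-vm header.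
import Mathlib
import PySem

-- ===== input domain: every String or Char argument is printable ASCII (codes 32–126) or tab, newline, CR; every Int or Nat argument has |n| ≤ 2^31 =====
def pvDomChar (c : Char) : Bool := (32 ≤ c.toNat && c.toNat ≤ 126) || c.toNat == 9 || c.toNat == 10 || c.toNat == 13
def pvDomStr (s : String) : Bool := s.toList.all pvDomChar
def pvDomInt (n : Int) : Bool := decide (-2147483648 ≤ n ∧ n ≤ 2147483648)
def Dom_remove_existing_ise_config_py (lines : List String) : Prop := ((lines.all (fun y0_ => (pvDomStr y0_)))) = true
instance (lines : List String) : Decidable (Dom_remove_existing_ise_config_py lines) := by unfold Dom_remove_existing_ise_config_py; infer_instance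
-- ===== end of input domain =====

-- B differs from A only in decomposition: segment the lines, then filter segments.

-- ===== PORT A =====
-- one iteration of A's for-loop over the state (filtered_lines, in_ise_block)
def pvStepA (st : List String × Bool) (line : String) : List String × Bool :=
  if PySem.Str.startswith (PySem.Str.strip line) "Host ise-vm" then
    (st.1, true)
  else if PySem.Str.startswith (PySem.Str.strip line) "Host " && st.2 then
    (st.1 ++ [line], false)
  else if !st.2 then
    (st.1 ++ [line], st.2)
  else
    st

def remove_existing_ise_config_py (lines : List String) : List String :=
  (lines.foldl pvStepA ([], false)).1

-- ===== PORT B =====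
-- phase-1 step: start a new segment at a "Host " header, else extend the current one
def pvStepB (st : List (List String) × List String) (line : String) :
    List (List String) × List String :=
  if PySem.Str.startswith (PySem.Str.strip line) "Host " then
    (st.1 ++ [st.2], [line])
  else
    (st.1, st.2 ++ [line])

-- phase-2 test: not (seg and seg[0].strip().startswith("Host ise-vm"))
def pvKeepSeg (seg : List String) : Bool :=
  match seg with
  | [] => true
  | h :: _ => !(PySem.Str.startswith (PySem.Str.strip h) "Host ise-vm")

def remove_existing_ise_config_py_alt (lines : List String) : List String :=
  let st := lines.foldl pvStepB ([], [])
  let segments := st.1 ++ [st.2]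
  segments.foldl (fun res seg => if pvKeepSeg seg then res ++ seg else res) []

-- ===== PRECONDITION & SPEC =====
def Spec_remove_existing_ise_config_py (lines : List String) (out : List String) : Prop := out = remove_existing_ise_config_py_alt lines
instance (lines : List String) (out : List String) : Decidable (Spec_remove_existing_ise_config_py lines out) := by unfold Spec_remove_existing_ise_config_py; infer_instance

-- ===== CLAIM (what is proved, stated in full; the proofs are below) =====
def Claim_equal_remove_existing_ise_config_py : Prop := ∀ (lines : List String), Dom_remove_existing_ise_config_py lines → Spec_remove_existing_ise_config_py lines (remove_existing_ise_config_py lines)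

-- ===== LEMMAS AND PROOFS =====

-- "Host ise-vm" header ⇒ "Host " header (prefix transitivity)
lemma pv_ise_imp_host (s : String)
    (h : PySem.Str.startswith s "Host ise-vm" = true) :
    PySem.Str.startswith s "Host " = true := by
  simp only [PySem.Str.startswith_eq, PySem.Chars.startswith_iff] at h ⊢
  exact List.IsPrefix.trans (by decide) h

-- phase 2 of B as filter-then-flatten
lemma pv_fold_keep (segs : List (List String)) (r : List String) :
    segs.foldl (fun res seg => if pvKeepSeg seg then res ++ seg else res) r
      = r ++ (segs.filter pvKeepSeg).flatten := by
  induction segs generalizing r with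
  | nil => simp
  | cons s t ih =>
      simp only [List.foldl_cons, List.filter_cons]
      by_cases h : pvKeepSeg s = true
      · simp [h, ih, List.append_assoc]
      · simp [Bool.of_not_eq_true h, ih]

-- the state invariant linking A's fold to B's fold
lemma pv_key (lines : List String) :
    ∀ (segs : List (List String)) (cur : List String),
      List.foldl pvStepA
        ((segs.filter pvKeepSeg).flatten ++ (if pvKeepSeg cur then cur else []),
         !pvKeepSeg cur) lines
      = (((List.foldl pvStepB (segs, cur) lines).1.filter pvKeepSeg).flatten
           ++ (if pvKeepSeg (List.foldl pvStepB (segs, cur) lines).2 then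
                 (List.foldl pvStepB (segs, cur) lines).2 else []),
         !pvKeepSeg (List.foldl pvStepB (segs, cur) lines).2) := by
  induction lines with
  | nil => intro segs cur; rfl
  | cons l t ih =>
      intro segs cur
      rw [List.foldl_cons, List.foldl_cons]
      by_cases hise : PySem.Str.startswith (PySem.Str.strip l) "Host ise-vm" = true
      · -- l is an ise-vm header: A enters the block, B starts a dropped segment
        have hhost := pv_ise_imp_host _ hise
        simp at hise hhost
        have hA : pvStepA
            ((segs.filter pvKeepSeg).flatten ++ (if pvKeepSeg cur then cur else []),
             !pvKeepSeg cur) l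
            = ((segs.filter pvKeepSeg).flatten ++ (if pvKeepSeg cur then cur else []), true) := by
          simp [pvStepA, hise]
        have hB : pvStepB (segs, cur) l = (segs ++ [cur], [l]) := by
          simp [pvStepB, hhost]
        rw [hA, hB]
        have hk : pvKeepSeg [l] = false := by simp [pvKeepSeg, hise]
        have hst : ((segs.filter pvKeepSeg).flatten ++ (if pvKeepSeg cur then cur else []),
              true)
            = ((((segs ++ [cur]).filter pvKeepSeg).flatten
                 ++ (if pvKeepSeg [l] then [l] else [])), !pvKeepSeg [l]) := by
          rw [hk]
          cases hc : pvKeepSeg cur <;>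
            simp [List.filter_append, hc]
        rw [hst]
        exact ih (segs ++ [cur]) [l]
      · by_cases hhost : PySem.Str.startswith (PySem.Str.strip l) "Host " = true
        · -- non-ise header: A appends it (whatever the flag), B starts a kept segment
          simp at hise hhost
          have hA : pvStepA
              ((segs.filter pvKeepSeg).flatten ++ (if pvKeepSeg cur then cur else []),
               !pvKeepSeg cur) l
              = ((segs.filter pvKeepSeg).flatten ++ (if pvKeepSeg cur then cur else []) ++ [l],
                 false) := by
            cases hc : pvKeepSeg cur <;> simp [pvStepA, hise, hhost]
          have hB : pvStepB (segs, cur) l = (segs ++ [cur], [l]) := by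
            simp [pvStepB, hhost]
          rw [hA, hB]
          have hk : pvKeepSeg [l] = true := by simp [pvKeepSeg, hise]
          have hst : ((segs.filter pvKeepSeg).flatten
                ++ (if pvKeepSeg cur then cur else []) ++ [l], false)
              = ((((segs ++ [cur]).filter pvKeepSeg).flatten
                   ++ (if pvKeepSeg [l] then [l] else [])), !pvKeepSeg [l]) := by
            rw [hk]
            cases hc : pvKeepSeg cur <;>
              simp [List.filter_append, hc, List.append_assoc]
          rw [hst]
          exact ih (segs ++ [cur]) [l]
        · -- ordinary line: appended iff the current segment is kept
          simp at hise hhost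
          have hA : pvStepA
              ((segs.filter pvKeepSeg).flatten ++ (if pvKeepSeg cur then cur else []),
               !pvKeepSeg cur) l
              = ((segs.filter pvKeepSeg).flatten
                   ++ (if pvKeepSeg (cur ++ [l]) then cur ++ [l] else []),
                 !pvKeepSeg (cur ++ [l])) := by
            cases cur with
            | nil => simp [pvStepA, pvKeepSeg, hise, hhost]
            | cons h0 t0 =>
                cases hc : pvKeepSeg (h0 :: t0) with
                | true =>
                    simp_all [pvStepA, pvKeepSeg]
                | false =>
                    simp_all [pvStepA, pvKeepSeg]
          have hB : pvStepB (segs, cur) l = (segs, cur ++ [l]) := by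
            simp [pvStepB, hhost]
          rw [hA, hB]
          exact ih segs (cur ++ [l])

-- ===== VERDICT (by name: the statement is the Claim_ definition above) =====
theorem remove_existing_ise_config_py_spec : Claim_equal_remove_existing_ise_config_py := by
  intro lines _
  unfold Spec_remove_existing_ise_config_py
  unfold remove_existing_ise_config_py remove_existing_ise_config_py_alt
  have h := pv_key lines [] []
  have h0 : pvKeepSeg ([] : List String) = true := rfl
  simp only [h0, List.filter_nil, List.flatten_nil, if_true, Bool.not_true,
    List.nil_append] at h
  rw [h, pv_fold_keep, List.filter_append, List.flatten_append]
  cases hc : pvKeepSeg (List.foldl pvStepB ([], []) lines).2 <;>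
    simp [hc]
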